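-- pv_equiv track=rewrite | github.com/goodwillcoding/nixops | nixops/backends/virtualbox.py | _parse_output_to_dict
-- ===== SOURCE A (Python) =====
-- def _parse_output_to_dict(lines, key_name):
--     groups = {}
--
--     group = {}
--     for line in lines:
--         if line != '':
--             key, dirty_value = line.split(":", 1)
--             value = dirty_value.lstrip()
--             group[key] = value
--         else:
--             groups[group[key_name]] = group
--             group = {}
--     return groups
-- ===== SOURCE B (Python) =====
-- def _parse_output_to_dict(lines, key_name):
--     # Phase 1: partition lines into committed segments; the trailing run
--     # (after the last blank line, or everything if no blank) is never committed.
--     segments = []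
--     current = []
--     for line in lines:
--         if line == '':
--             segments.append(current)
--             current = []
--         else:
--             current.append(line)
--     # Phase 2: turn each committed segment into a dict, index by its key_name value.
--     groups = {}
--     for segment in segments:
--         group = {}
--         for line in segment:
--             key, dirty_value = line.split(':', 1)
--             group[key] = dirty_value.lstrip()
--         groups[group[key_name]] = group
--     return groups
-- ===== Notes on version B (the rewrite author's own statement) =====
-- stated objective: alternative
-- what changed: Replaces A's single stateful loop (carrying a pending group dict and committing it whenever a blank line appears) by a two-phase decomposition: first partition the lines into committed segments at the '' sentinels (the trailing uncommitted run is dropped whole), then build each segment into a group dict and index it by its key_name value.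
import Mathlib
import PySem

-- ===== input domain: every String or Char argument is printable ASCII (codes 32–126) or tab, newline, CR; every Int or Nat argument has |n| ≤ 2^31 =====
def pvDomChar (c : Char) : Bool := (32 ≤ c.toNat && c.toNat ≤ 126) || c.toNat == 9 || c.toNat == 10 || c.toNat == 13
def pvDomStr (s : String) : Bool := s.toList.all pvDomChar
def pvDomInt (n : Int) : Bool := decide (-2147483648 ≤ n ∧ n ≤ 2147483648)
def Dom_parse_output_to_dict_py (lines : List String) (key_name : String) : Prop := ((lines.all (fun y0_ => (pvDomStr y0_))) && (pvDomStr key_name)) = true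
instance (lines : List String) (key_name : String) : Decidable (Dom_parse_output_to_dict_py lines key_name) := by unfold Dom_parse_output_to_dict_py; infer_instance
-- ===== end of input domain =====

-- B replaces A's single stateful loop by two phases (partition lines into committed
-- segments, then build each segment into a group dict); equivalence of RETURN values,
-- objective: alternative decomposition, not faster.

-- ===== PORT A =====
-- shared per-line primitive: key, dirty_value = line.split(":", 1); value = dirty_value.lstrip()
-- (when the line has no ':' Python raises ValueError — excluded by Pre_; the default branch is never claimed)
def pvSplitKV (line : String) : String × String :=
  match PySem.Str.splitMax? line ":" 1 with
  | some [k, dv] => (k, PySem.Str.lstrip dv)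
  | _ => (line, "")

-- literal port of A: one fold carrying (groups, group); group[key_name] is getD with a
-- default "" (Python raises KeyError there — excluded by Pre_)
def parse_output_to_dict_py (lines : List String) (key_name : String) : List (String × List (String × String)) :=
  ((lines.foldl
    (fun (st : PySem.Dict String (PySem.Dict String String) × PySem.Dict String String) line =>
      if line ≠ "" then
        (st.1, st.2.insert (pvSplitKV line).1 (pvSplitKV line).2)
      else
        (st.1.insert (st.2.getD key_name "") st.2, PySem.Dict.empty))
    (PySem.Dict.empty, PySem.Dict.empty)).1).items.map (fun p => (p.1, p.2.items))

-- ===== PORT B =====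
def pvBuildGroup (seg : List String) : PySem.Dict String String :=
  seg.foldl (fun g line => g.insert (pvSplitKV line).1 (pvSplitKV line).2) PySem.Dict.empty

def parse_output_to_dict_py_alt (lines : List String) (key_name : String) : List (String × List (String × String)) :=
  let part := lines.foldl
    (fun (st : List (List String) × List String) line =>
      if line = "" then (st.1 ++ [st.2], ([] : List String)) else (st.1, st.2 ++ [line]))
    ([], [])
  (part.1.foldl
    (fun groups seg =>
      let g := pvBuildGroup seg
      groups.insert (g.getD key_name "") g)
    PySem.Dict.empty).items.map (fun p => (p.1, p.2.items))

-- ===== PRECONDITION & SPEC =====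
-- Pre_ = exactly the inputs on which Python A returns: every nonempty line contains ':'
-- (else ValueError on unpacking split(':', 1)) and every committed segment (the pieces
-- of `lines` split on the '' sentinel, except the trailing uncommitted one) contains a
-- line whose key (prefix before the first ':') equals key_name (else KeyError).
def Pre_parse_output_to_dict_py (lines : List String) (key_name : String) : Prop :=
  (∀ l ∈ lines, l ≠ "" → ':' ∈ l.toList) ∧
  (∀ seg ∈ (lines.splitOn "").dropLast, ∃ l ∈ seg, l.toList.takeWhile (· ≠ ':') = key_name.toList)
instance (lines : List String) (key_name : String) : Decidable (Pre_parse_output_to_dict_py lines key_name) := by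
  unfold Pre_parse_output_to_dict_py; infer_instance

def pvWitness_parse_output_to_dict_py : List String × String := (["id:7", "name: n1", "", "id:8", ""], "id")

def Spec_parse_output_to_dict_py (lines : List String) (key_name : String) (out : List (String × List (String × String))) : Prop := out = parse_output_to_dict_py_alt lines key_name
instance (lines : List String) (key_name : String) (out : List (String × List (String × String))) : Decidable (Spec_parse_output_to_dict_py lines key_name out) := by unfold Spec_parse_output_to_dict_py; infer_instance

-- ===== CLAIM (what is proved, stated in full; the proofs are below) =====
def Claim_equal_parse_output_to_dict_py : Prop := ∀ (lines : List String) (key_name : String), Dom_parse_output_to_dict_py lines key_name → Pre_parse_output_to_dict_py lines key_name → Spec_parse_output_to_dict_py lines key_name (parse_output_to_dict_py lines key_name)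


-- ===== LEMMAS AND PROOFS =====

-- the segments accumulator of B's first phase distributes over its initial value
lemma pv_part_fst (lines : List String) (segs : List (List String)) (cur : List String) :
    (lines.foldl
      (fun (st : List (List String) × List String) line =>
        if line = "" then (st.1 ++ [st.2], ([] : List String)) else (st.1, st.2 ++ [line]))
      (segs, cur)).1
    = segs ++ (lines.foldl
      (fun (st : List (List String) × List String) line =>
        if line = "" then (st.1 ++ [st.2], ([] : List String)) else (st.1, st.2 ++ [line]))
      ([], cur)).1 := by
  induction lines generalizing segs cur with
  | nil => simp
  | cons l t ih =>
    by_cases h : l = ""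
    · simp only [List.foldl_cons, if_pos h, List.nil_append]
      rw [ih (segs ++ [cur]) [], ih [cur] []]
      simp
    · simp only [List.foldl_cons, if_neg h]
      exact ih segs (cur ++ [l])

-- A's single fold, started on the group built from the pending run `cur`, computes
-- B's second phase over the segments B's first phase extracts from `lines`.
lemma pv_main (key_name : String) (lines : List String)
    (groups : PySem.Dict String (PySem.Dict String String)) (cur : List String) :
    (lines.foldl
      (fun (st : PySem.Dict String (PySem.Dict String String) × PySem.Dict String String) line =>
        if line ≠ "" then
          (st.1, st.2.insert (pvSplitKV line).1 (pvSplitKV line).2)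
        else
          (st.1.insert (st.2.getD key_name "") st.2, PySem.Dict.empty))
      (groups, pvBuildGroup cur)).1
    = ((lines.foldl
        (fun (st : List (List String) × List String) line =>
          if line = "" then (st.1 ++ [st.2], ([] : List String)) else (st.1, st.2 ++ [line]))
        ([], cur)).1).foldl
        (fun groups seg =>
          let g := pvBuildGroup seg
          groups.insert (g.getD key_name "") g)
        groups := by
  induction lines generalizing groups cur with
  | nil => simp
  | cons l t ih =>
    by_cases h : l = ""
    · simp only [List.foldl_cons, if_pos h, if_neg (by simp [h] : ¬ l ≠ ""), List.nil_append]
      rw [pv_part_fst t [cur] [], List.foldl_append]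
      exact ih (groups.insert ((pvBuildGroup cur).getD key_name "") (pvBuildGroup cur)) []
    · simp only [List.foldl_cons, if_pos h, if_neg h]
      have hb : (pvBuildGroup cur).insert (pvSplitKV l).1 (pvSplitKV l).2 = pvBuildGroup (cur ++ [l]) := by
        simp [pvBuildGroup, List.foldl_append]
      rw [hb]
      exact ih groups (cur ++ [l])

-- ===== VERDICT (by name: the statement is the Claim_ definition above) =====
theorem parse_output_to_dict_py_spec : Claim_equal_parse_output_to_dict_py := by
  intro lines key_name _ _
  unfold Spec_parse_output_to_dict_py parse_output_to_dict_py parse_output_to_dict_py_alt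
  exact congrArg (fun d => d.items.map (fun p => (p.1, p.2.items)))
    (pv_main key_name lines PySem.Dict.empty [])
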